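-- pv_equiv track=rewrite | github.com/reh3376/ignition_tools | src/ignition/code_intelligence/automated_syntax_fixer.py | _fix_incomplete_try_blocks
-- ===== SOURCE A (Python) =====
-- def _fix_incomplete_try_blocks(content: str) -> tuple[str, list[str]]:
--     """Fix incomplete try/except blocks."""
--     lines = content.split("\n")
--     fixed_lines = []
--     fixes = []
--
--     i = 0
--     while i < len(lines):
--         line = lines[i]
--         line_num = i + 1
--
--         # Check for try block without proper except/finally
--         if line.strip() == "try:":
--             # Look ahead to see if there's a proper except/finally
--             has_except_or_finally = False
--             try_indent = len(line) - len(line.lstrip())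
--
--             j = i + 1
--             while j < len(lines):
--                 next_line = lines[j]
--                 if next_line.strip() == "":
--                     j += 1
--                     continue
--
--                 next_indent = len(next_line) - len(next_line.lstrip())
--                 if next_indent <= try_indent:
--                     # Same or less indentation, check if it's except/finally
--                     if next_line.strip().startswith(("except", "finally")):
--                         has_except_or_finally = True
--                     break
--                 j += 1
--
--             if not has_except_or_finally:
--                 # Add a basic except block
--                 fixed_lines.append(line)
--                 fixed_lines.append(" " * (try_indent + 4) + "pass  # TODO: Add try block content")
--                 fixed_lines.append(" " * try_indent + "except Exception as e:")
--                 fixed_lines.append(" " * (try_indent + 4) + "pass  # TODO: Handle exception")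
--                 fixes.append(f"Line {line_num}: Added except block for incomplete try")
--             else:
--                 fixed_lines.append(line)
--         else:
--             fixed_lines.append(line)
--
--         i += 1
--
--     return "\n".join(fixed_lines), fixes
-- ===== SOURCE B (Python) =====
-- def _except_block(t):
--     return [" " * (t + 4) + "pass  # TODO: Add try block content",
--             " " * t + "except Exception as e:",
--             " " * (t + 4) + "pass  # TODO: Handle exception"]
--
--
-- def _fix_incomplete_try_blocks(content: str) -> tuple[str, list[str]]:
--     """Fix incomplete try/except blocks (two staged passes: mark, then emit)."""
--     lines = content.split("\n")
--     # pass 1 (backward): mark each bare 'try:' line with no except/finally handler,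
--     # using a pruned (indent, is-handler) stack of the lines below it
--     marks = [False] * len(lines)
--     stack = []
--     for i in range(len(lines) - 1, -1, -1):
--         line = lines[i]
--         s = line.strip()
--         ind = len(line) - len(line.lstrip())
--         if s == "try:":
--             marks[i] = not next((h for d, h in stack if d <= ind), False)
--         if s:
--             stack = [(ind, s.startswith(("except", "finally")))] + [e for e in stack if e[0] < ind]
--     # pass 2 (forward): emit lines, inserting a synthetic except block after marked tries
--     out = []
--     fixes = []
--     for i, (line, bad) in enumerate(zip(lines, marks)):
--         out.append(line)
--         if bad:
--             out += _except_block(len(line) - len(line.lstrip()))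
--             fixes.append(f"Line {i + 1}: Added except block for incomplete try")
--     return "\n".join(out), fixes
-- ===== Notes on version B (the rewrite author's own statement) =====
-- stated objective: faster
-- what changed: Replaces A's single forward loop with per-try quadratic look-ahead rescans by two staged linear passes: a backward marking pass maintaining a pruned (indent, is-handler) stack that answers each try line's handler query, then a forward emission pass consuming the precomputed marks.
import Mathlib
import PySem

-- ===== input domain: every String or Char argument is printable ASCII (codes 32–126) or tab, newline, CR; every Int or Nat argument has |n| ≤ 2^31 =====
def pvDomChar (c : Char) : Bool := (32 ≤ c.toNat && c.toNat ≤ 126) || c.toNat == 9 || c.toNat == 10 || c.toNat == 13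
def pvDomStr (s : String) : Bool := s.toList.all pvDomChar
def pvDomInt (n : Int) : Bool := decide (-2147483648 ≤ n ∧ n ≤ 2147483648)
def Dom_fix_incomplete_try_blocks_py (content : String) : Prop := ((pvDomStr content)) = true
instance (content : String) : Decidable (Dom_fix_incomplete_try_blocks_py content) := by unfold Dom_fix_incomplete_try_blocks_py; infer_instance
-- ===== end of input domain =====

-- B replaces A's forward loop with quadratic per-try look-aheads by two staged linear passes
-- (backward marking with a pruned indent stack, then forward emission); objective: faster (asymptotic).

-- shared per-line primitives (Python built-ins both versions use identically)
def pvIndent (line : String) : Int :=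
  PySem.Str.len line - PySem.Str.len (PySem.Str.lstrip line)

def pvIsHandler (stripped : String) : Bool :=
  PySem.Str.startswith stripped "except" || PySem.Str.startswith stripped "finally"

def pvSpaces (n : Int) : String := String.ofList (PySem.List.pyRepeat [' '] n)

def pvMsg (lineNum : Int) : String :=
  "Line " ++ PySem.Int.toStr lineNum ++ ": Added except block for incomplete try"

-- ===== PORT A =====
-- A's inner while loop: scan forward from the line after the try
def pvLookahead (t : Int) : List String → Bool
  | [] => false
  | l :: rest =>
    if PySem.Str.strip l = "" then pvLookahead t rest
    else if pvIndent l ≤ t then pvIsHandler (PySem.Str.strip l)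
    else pvLookahead t rest

-- A's outer while loop over i (the suffix of lines starting at index i)
def pvALoop : Nat → List String → List String × List String
  | _, [] => ([], [])
  | i, line :: rest =>
    let p := pvALoop (i + 1) rest
    if PySem.Str.strip line = "try:" then
      let t := pvIndent line
      if pvLookahead t rest then (line :: p.1, p.2)
      else
        (line ::
           (pvSpaces (t + 4) ++ "pass  # TODO: Add try block content") ::
           (pvSpaces t ++ "except Exception as e:") ::
           (pvSpaces (t + 4) ++ "pass  # TODO: Handle exception") :: p.1,
         pvMsg ((i : Int) + 1) :: p.2)
    else (line :: p.1, p.2)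

def fix_incomplete_try_blocks_py (content : String) : String × List String :=
  let lines := (PySem.Str.split? content "\n").getD []
  let p := pvALoop 0 lines
  (PySem.Str.join "\n" p.1, p.2)

-- ===== PORT B =====
-- Source B's _except_block helper
def pvBlock (t : Int) : List String :=
  [pvSpaces (t + 4) ++ "pass  # TODO: Add try block content",
   pvSpaces t ++ "except Exception as e:",
   pvSpaces (t + 4) ++ "pass  # TODO: Handle exception"]

-- pass 1 (backward): for the suffix of lines, the per-line marks and the pruned stack
def pvMarks : List String → List Bool × List (Int × Bool)
  | [] => ([], [])
  | line :: rest =>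
    let q := pvMarks rest
    let s := PySem.Str.strip line
    let m := decide (s = "try:") &&
      !(((q.2.find? (fun e => decide (e.1 ≤ pvIndent line))).map Prod.snd).getD false)
    (m :: q.1,
     if s = "" then q.2
     else (pvIndent line, pvIsHandler s) :: q.2.filter (fun e => decide (e.1 < pvIndent line)))

-- pass 2 (forward): emit the lines, inserting a block after each marked line
def pvEmit : Nat → List (String × Bool) → List String × List String
  | _, [] => ([], [])
  | i, (line, bad) :: rest =>
    let p := pvEmit (i + 1) rest
    if bad then
      (line :: (pvBlock (pvIndent line) ++ p.1), pvMsg ((i : Int) + 1) :: p.2)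
    else (line :: p.1, p.2)

def fix_incomplete_try_blocks_py_alt (content : String) : String × List String :=
  let lines := (PySem.Str.split? content "\n").getD []
  let p := pvEmit 0 (lines.zip (pvMarks lines).1)
  (PySem.Str.join "\n" p.1, p.2)

-- ===== PRECONDITION & SPEC =====
def Spec_fix_incomplete_try_blocks_py (content : String) (out : String × List String) : Prop := out = fix_incomplete_try_blocks_py_alt content
instance (content : String) (out : String × List String) : Decidable (Spec_fix_incomplete_try_blocks_py content out) := by unfold Spec_fix_incomplete_try_blocks_py; infer_instance

-- ===== CLAIM =====
def Claim_equal_fix_incomplete_try_blocks_py : Prop := ∀ (content : String), Dom_fix_incomplete_try_blocks_py content → Spec_fix_incomplete_try_blocks_py content (fix_incomplete_try_blocks_py content)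

-- ===== LEMMAS AND PROOFS =====

-- entries with indent ≥ d are transparent to the handler query when t < d,
-- so pass 1's pruning never changes an answer for an outer try
theorem pvFind_filter (s : List (Int × Bool)) (d t : Int) (h : t < d) :
    (s.filter (fun e => decide (e.1 < d))).find? (fun e => decide (e.1 ≤ t)) =
      s.find? (fun e => decide (e.1 ≤ t)) := by
  induction s with
  | nil => rfl
  | cons e rest ih =>
    by_cases hd : e.1 < d
    · by_cases ht : e.1 ≤ t <;> simp [List.filter, List.find?, hd, ht, ih]
    · have hnt : ¬ e.1 ≤ t := by omega
      simp [List.filter, List.find?, hd, hnt, ih]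

-- the stack built by pass 1 answers exactly A's forward look-ahead
theorem pvMarks_stack (rest : List String) (t : Int) :
    (((pvMarks rest).2.find? (fun e => decide (e.1 ≤ t))).map Prod.snd).getD false =
      pvLookahead t rest := by
  induction rest generalizing t with
  | nil => rfl
  | cons l rest ih =>
    by_cases hb : PySem.Str.strip l = ""
    · simp [pvMarks, hb, pvLookahead, ih]
    · by_cases hle : pvIndent l ≤ t
      · simp [pvMarks, hb, pvLookahead, hle]
      · have h2 := pvFind_filter (pvMarks rest).2 (pvIndent l) t (by omega)
        simp [pvMarks, hb, pvLookahead, hle, h2, ih]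

-- the two staged passes compose to exactly A's single loop
theorem pvEmit_zip_eq_pvALoop (lines : List String) (i : Nat) :
    pvEmit i (lines.zip (pvMarks lines).1) = pvALoop i lines := by
  induction lines generalizing i with
  | nil => rfl
  | cons l rest ih =>
    have hm : (pvMarks (l :: rest)).1 =
        (decide (PySem.Str.strip l = "try:") &&
          !(((pvMarks rest).2.find? (fun e => decide (e.1 ≤ pvIndent l))).map Prod.snd).getD false)
          :: (pvMarks rest).1 := rfl
    rw [hm]
    have ih' : pvEmit (i + 1) (List.zipWith Prod.mk rest (pvMarks rest).1) = pvALoop (i + 1) rest := by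
      simpa [List.zip] using ih (i + 1)
    by_cases ht : PySem.Str.strip l = "try:"
    · by_cases hl : pvLookahead (pvIndent l) rest
      · simp [List.zip, pvEmit, pvALoop, ht, hl, pvMarks_stack, ih']
      · simp [List.zip, pvEmit, pvALoop, pvBlock, ht, hl, pvMarks_stack, ih']
    · simp [List.zip, pvEmit, pvALoop, ht, ih']

-- ===== VERDICT =====
theorem fix_incomplete_try_blocks_py_spec : Claim_equal_fix_incomplete_try_blocks_py := by
  intro content _
  show _ = _
  simp only [fix_incomplete_try_blocks_py, fix_incomplete_try_blocks_py_alt,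
    pvEmit_zip_eq_pvALoop]
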